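-- pv_equiv track=rewrite | github.com/RaoufOuanis/wsn-fss-simulation | app/app_streamlit.py | _compute_markers
-- ===== SOURCE A (Python) =====
-- from typing import Dict, List, Tuple, Optional
--
-- def _compute_markers(alive_history: List[int], n0: int, max_rounds: int) -> Tuple[int, int, int]:
--     fnd = max_rounds
--     hnd = max_rounds
--     lnd = max_rounds
--     for r, alive in enumerate(alive_history, start=1):
--         if fnd == max_rounds and alive < n0:
--             fnd = r
--         if hnd == max_rounds and alive <= n0 / 2:
--             hnd = r
--         if alive == 0:
--             lnd = r
--             break
--     return int(fnd), int(hnd), int(lnd)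
-- ===== SOURCE B (Python) =====
-- def _compute_markers(alive_history, n0, max_rounds):
--     # Markers are meaningful only up to (and including) the round the network dies.
--     try:
--         z = alive_history.index(0)
--         prefix = alive_history[:z + 1]
--         lnd = z + 1
--     except ValueError:
--         prefix = alive_history
--         lnd = max_rounds
--     fnd = next((r for r, a in enumerate(prefix, 1) if a < n0), max_rounds)
--     hnd = next((r for r, a in enumerate(prefix, 1) if a <= n0 / 2), max_rounds)
--     return int(fnd), int(hnd), int(lnd)
-- ===== Notes on version B (the rewrite author's own statement) =====
-- stated objective: simpler
-- what changed: Replaces the single loop with three coupled sentinel-guarded updates by three independent first-match searches over the history truncated at the first zero, which also fixes A's sentinel collision when the first qualifying round number equals max_rounds.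
-- intended difference: When the first round whose alive count satisfies a marker predicate (alive < n0, or alive <= n0/2) happens to be round number max_rounds and a later round before network death also satisfies it, A's 'fnd == max_rounds' sentinel test fires again and A returns that later round, while B returns the actual first such round, which is the intended marker. — e.g. on _compute_markers([1, -2], 4, 1): A returns (2, 2, 1), B returns (1, 1, 1)
import Mathlib
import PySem

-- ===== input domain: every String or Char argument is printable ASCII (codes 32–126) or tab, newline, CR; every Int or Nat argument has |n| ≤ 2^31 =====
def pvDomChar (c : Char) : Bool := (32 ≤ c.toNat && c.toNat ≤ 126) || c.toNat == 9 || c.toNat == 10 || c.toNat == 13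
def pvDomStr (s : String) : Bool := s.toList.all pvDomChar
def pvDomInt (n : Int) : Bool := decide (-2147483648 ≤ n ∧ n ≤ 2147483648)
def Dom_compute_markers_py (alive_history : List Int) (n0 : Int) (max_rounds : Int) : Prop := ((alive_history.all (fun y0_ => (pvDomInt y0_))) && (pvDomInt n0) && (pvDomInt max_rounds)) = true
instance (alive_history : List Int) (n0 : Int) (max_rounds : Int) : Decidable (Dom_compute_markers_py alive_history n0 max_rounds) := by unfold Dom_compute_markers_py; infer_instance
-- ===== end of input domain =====

-- B computes each death marker by an independent first-match search on the history truncated at the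
-- first zero (simpler decomposition); it intentionally fixes A's 'fnd == max_rounds' sentinel collision (see D_ below).
-- Python's 'alive <= n0 / 2' (true division) is ported as '2*alive ≤ n0': exact on Dom (|n0| ≤ 2^31, so n0/2 is an exact float).

-- ===== PORT A =====
def aLoop (n0 max_rounds : Int) : List Int → Int → Int → Int → Int → Int × Int × Int
  | [], _, fnd, hnd, lnd => (fnd, hnd, lnd)
  | a :: rest, r, fnd, hnd, lnd =>
    let fnd' := if fnd = max_rounds ∧ a < n0 then r else fnd
    let hnd' := if hnd = max_rounds ∧ 2 * a ≤ n0 then r else hnd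
    if a = 0 then (fnd', hnd', r) else aLoop n0 max_rounds rest (r + 1) fnd' hnd' lnd

def compute_markers_py (alive_history : List Int) (n0 : Int) (max_rounds : Int) : Int × Int × Int :=
  aLoop n0 max_rounds alive_history 1 max_rounds max_rounds max_rounds

-- ===== PORT B =====
-- next((r for r, a in enumerate(prefix, 1) if p a), default) = (bFind p prefix 1).getD default
def bFind (p : Int → Bool) : List Int → Int → Option Int
  | [], _ => none
  | a :: rest, r => if p a then some r else bFind p rest (r + 1)

def compute_markers_py_alt (alive_history : List Int) (n0 : Int) (max_rounds : Int) : Int × Int × Int :=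
  let pl : List Int × Int :=
    match PySem.List.index? alive_history 0 with
    | some z => (PySem.List.slice alive_history none (some ((z : Int) + 1)), (z : Int) + 1)
    | none => (alive_history, max_rounds)
  let fnd := (bFind (fun a => decide (a < n0)) pl.1 1).getD max_rounds
  let hnd := (bFind (fun a => decide (2 * a ≤ n0)) pl.1 1).getD max_rounds
  (fnd, hnd, pl.2)

-- ===== PRECONDITION & SPEC =====
-- pvHit pre q M: the first element of pre satisfying q sits at 1-based position M and at least
-- one later element of pre also satisfies q
def pvHit (pre : List Int) (q : Int → Bool) (M : Int) : Prop :=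
  (pre.findIdx q : Int) + 1 = M ∧ 2 ≤ pre.countP q

-- When the first qualifying round for a marker (alive < n0, or alive <= n0/2) equals max_rounds and
-- a later qualifying round exists before network death, A's sentinel test fires again and A returns
-- the later round; B returns the actual first qualifying round, which is the intended marker.
def D_compute_markers_py (alive_history : List Int) (n0 : Int) (max_rounds : Int) : Prop :=
  let pre := alive_history.take (alive_history.findIdx (· == 0) + 1)
  pvHit pre (n0 > ·) max_rounds ∨ pvHit pre (fun v => n0 ≥ v + v) max_rounds

instance (alive_history : List Int) (n0 : Int) (max_rounds : Int) : Decidable (D_compute_markers_py alive_history n0 max_rounds) := by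
  unfold D_compute_markers_py pvHit; infer_instance

def Spec_compute_markers_py (alive_history : List Int) (n0 : Int) (max_rounds : Int) (out : Int × Int × Int) : Prop :=
  ¬ D_compute_markers_py alive_history n0 max_rounds → out = compute_markers_py_alt alive_history n0 max_rounds
instance (alive_history : List Int) (n0 : Int) (max_rounds : Int) (out : Int × Int × Int) : Decidable (Spec_compute_markers_py alive_history n0 max_rounds out) := by unfold Spec_compute_markers_py; infer_instance

def pvDiffWitness_compute_markers_py : List Int × Int × Int := ([1, -2], 4, 1)
def pvDiffWitnessOut_compute_markers_py : (Int × Int × Int) × (Int × Int × Int) := ((2, 2, 1), (1, 1, 1))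

-- ===== CLAIM (what is proved, stated in full; the proofs are below) =====
def Claim_unchanged_compute_markers_py : Prop := ∀ (alive_history : List Int) (n0 : Int) (max_rounds : Int), Dom_compute_markers_py alive_history n0 max_rounds → Spec_compute_markers_py alive_history n0 max_rounds (compute_markers_py alive_history n0 max_rounds)
def Claim_changed_compute_markers_py : Prop := Dom_compute_markers_py (pvDiffWitness_compute_markers_py.1) (pvDiffWitness_compute_markers_py.2.1) (pvDiffWitness_compute_markers_py.2.2) ∧ D_compute_markers_py (pvDiffWitness_compute_markers_py.1) (pvDiffWitness_compute_markers_py.2.1) (pvDiffWitness_compute_markers_py.2.2) ∧ compute_markers_py (pvDiffWitness_compute_markers_py.1) (pvDiffWitness_compute_markers_py.2.1) (pvDiffWitness_compute_markers_py.2.2) = pvDiffWitnessOut_compute_markers_py.1 ∧ compute_markers_py_alt (pvDiffWitness_compute_markers_py.1) (pvDiffWitness_compute_markers_py.2.1) (pvDiffWitness_compute_markers_py.2.2) = pvDiffWitnessOut_compute_markers_py.2 ∧ pvDiffWitnessOut_compute_markers_py.1 ≠ pvDiffWitnessOut_compute_markers_py.2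
def Claim_exact_compute_markers_py : Prop := ∀ (alive_history : List Int) (n0 : Int) (max_rounds : Int), Dom_compute_markers_py alive_history n0 max_rounds → D_compute_markers_py alive_history n0 max_rounds → compute_markers_py alive_history n0 max_rounds ≠ compute_markers_py_alt alive_history n0 max_rounds

-- ===== LEMMAS AND PROOFS =====

-- proof-side recursive forms of the truncated prefix and qualifying-round lists
def pvPref : List Int → List Int
  | [] => []
  | a :: rest => if a = 0 then [a] else a :: pvPref rest

def pvRounds (p : Int → Bool) : List Int → Int → List Int
  | [], _ => []
  | a :: rest, r => if p a then r :: pvRounds p rest (r + 1) else pvRounds p rest (r + 1)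

def pvCollide (rs : List Int) (M : Int) : Prop := rs.head? = some M ∧ 2 ≤ rs.length

theorem pre_eq_pvPref : ∀ (xs : List Int),
    xs.take (xs.findIdx (· == 0) + 1) = pvPref xs := by
  intro xs
  induction xs with
  | nil => rfl
  | cons a rest ih =>
    by_cases ha : a = 0
    · simp [pvPref, List.findIdx_cons, ha]
    · have hb : (a == (0:Int)) = false := by simp [ha]
      simp [pvPref, List.findIdx_cons, ha, hb, ih]

theorem rounds_len (q : Int → Bool) : ∀ (pre : List Int) (r : Int),
    (pvRounds q pre r).length = pre.countP q := by
  intro pre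
  induction pre with
  | nil => intro r; simp [pvRounds]
  | cons a rest ih =>
    intro r
    by_cases hq : q a <;> simp [pvRounds, hq, ih]

theorem rounds_head (q : Int → Bool) : ∀ (pre : List Int) (r : Int),
    (pvRounds q pre r).head? =
      if pre.findIdx q = pre.length then none else some (r + (pre.findIdx q : Int)) := by
  intro pre
  induction pre with
  | nil => intro r; simp [pvRounds]
  | cons a rest ih =>
    intro r
    by_cases hq : q a
    · simp [pvRounds, List.findIdx_cons, hq]
    · rw [show pvRounds q (a :: rest) r = pvRounds q rest (r + 1) by simp [pvRounds, hq], ih]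
      simp only [List.findIdx_cons, hq, cond_false, List.length_cons]
      by_cases h : rest.findIdx q = rest.length
      · simp [h]
      · simp [h]
        ring

theorem hit_iff (pre : List Int) (q : Int → Bool) (M : Int) :
    pvHit pre q M ↔ pvCollide (pvRounds q pre 1) M := by
  simp only [pvHit, pvCollide]
  rw [rounds_head, rounds_len]
  by_cases h : pre.findIdx q = pre.length
  · have hc : pre.countP q = 0 :=
      List.countP_eq_zero.mpr (fun a ha => by simp [List.findIdx_eq_length.mp h a ha])
    rw [hc, if_pos h]
    simp
  · rw [if_neg h]
    constructor
    · rintro ⟨h1, h2⟩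
      exact ⟨by rw [← h1]; ring_nf, h2⟩
    · rintro ⟨h1, h2⟩
      have : (1 : Int) + (pre.findIdx q : Int) = M := by simpa using h1
      exact ⟨by omega, h2⟩

theorem D_iff (xs : List Int) (n0 M : Int) :
    D_compute_markers_py xs n0 M ↔
      (pvCollide (pvRounds (fun a => decide (a < n0)) (pvPref xs) 1) M ∨
       pvCollide (pvRounds (fun a => decide (2 * a ≤ n0)) (pvPref xs) 1) M) := by
  simp only [D_compute_markers_py]
  rw [pre_eq_pvPref, hit_iff, hit_iff,
    show (fun v : Int => decide (n0 > v)) = (fun a : Int => decide (a < n0)) from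
      funext (fun v => decide_eq_decide.mpr (by omega)),
    show (fun v : Int => decide (n0 ≥ v + v)) = (fun a : Int => decide (2 * a ≤ n0)) from
      funext (fun v => decide_eq_decide.mpr (by omega))]

-- A's fnd/hnd state machine, one component at a time
def fndRun (p : Int → Bool) (M : Int) : List Int → Int → Int → Int
  | [], _, f => f
  | a :: rest, r, f =>
    let f' := if f = M ∧ p a = true then r else f
    if a = 0 then f' else fndRun p M rest (r + 1) f'

def lndRun (M : Int) : List Int → Int → Int
  | [], _ => M
  | a :: rest, r => if a = 0 then r else lndRun M rest (r + 1)

-- what A's sentinel-guarded update computes from the list of qualifying rounds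
def gg (rs : List Int) (M : Int) : Int :=
  match rs with
  | [] => M
  | m :: rest => if m = M then rest.head?.getD M else m

theorem aLoop_eq (n0 M : Int) : ∀ (xs : List Int) (r f h : Int),
    aLoop n0 M xs r f h M =
      (fndRun (fun a => decide (a < n0)) M xs r f, fndRun (fun a => decide (2 * a ≤ n0)) M xs r h, lndRun M xs r) := by
  intro xs
  induction xs with
  | nil => intro r f h; simp [aLoop, fndRun, lndRun]
  | cons a rest ih =>
    intro r f h
    by_cases ha : a = 0
    · simp [aLoop, fndRun, lndRun, ha]
    · simp [aLoop, fndRun, lndRun, ha, ih]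

theorem rounds_lb (p : Int → Bool) : ∀ (xs : List Int) (r m : Int), m ∈ pvRounds p xs r → r ≤ m := by
  intro xs
  induction xs with
  | nil => intro r m hm; simp [pvRounds] at hm
  | cons a rest ih =>
    intro r m hm
    by_cases hp : p a
    · simp [pvRounds, hp] at hm
      rcases hm with h | h
      · omega
      · have := ih (r + 1) m h; omega
    · simp [pvRounds, hp] at hm
      have := ih (r + 1) m hm; omega

theorem gg_of_lb (rs : List Int) (M r : Int) (hr : M < r) (h : ∀ m ∈ rs, r ≤ m) :
    gg rs M = rs.head?.getD M := by
  cases rs with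
  | nil => rfl
  | cons m rest =>
    have hm : r ≤ m := h m (by simp)
    simp [gg, show ¬(m = M) by omega]

theorem fndRun_eq (p : Int → Bool) (M : Int) : ∀ (xs : List Int) (r f : Int),
    fndRun p M xs r f = if f = M then gg (pvRounds p (pvPref xs) r) M else f := by
  intro xs
  induction xs with
  | nil => intro r f; simp [fndRun, pvPref, pvRounds, gg]
  | cons a rest ih =>
    intro r f
    by_cases hf : f = M
    · rw [hf, if_pos rfl]
      by_cases hp : p a = true
      · by_cases ha : a = 0
        · subst ha
          have hrs : pvRounds p (pvPref ((0:Int) :: rest)) r = [r] := by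
            simp [pvPref, pvRounds, hp]
          rw [show fndRun p M ((0:Int) :: rest) r M = r by simp [fndRun, hp], hrs, gg]
          by_cases hr : r = M <;> simp [hr]
        · have hstep : fndRun p M (a :: rest) r M = fndRun p M rest (r + 1) r := by
            simp [fndRun, hp, ha]
          have hrw : pvRounds p (pvPref (a :: rest)) r = r :: pvRounds p (pvPref rest) (r + 1) := by
            simp [pvPref, pvRounds, ha, hp]
          rw [hstep, ih, hrw]
          by_cases hr : r = M
          · rw [if_pos hr, gg, if_pos hr,
              gg_of_lb _ M (r + 1) (by omega) (rounds_lb p (pvPref rest) (r + 1))]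
          · rw [if_neg hr, gg, if_neg hr]
      · by_cases ha : a = 0
        · subst ha
          simp [fndRun, pvPref, pvRounds, gg, hp]
        · simp [fndRun, pvPref, pvRounds, ha, hp, ih]
    · by_cases ha : a = 0 <;> simp [fndRun, hf, ha, ih]

theorem bFind_eq (p : Int → Bool) : ∀ (xs : List Int) (r : Int),
    bFind p xs r = (pvRounds p xs r).head? := by
  intro xs
  induction xs with
  | nil => intro r; simp [bFind, pvRounds]
  | cons a rest ih =>
    intro r
    by_cases hp : p a
    · simp [bFind, pvRounds, hp]
    · simp [bFind, pvRounds, hp, ih]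

theorem pvPref_of_not_mem : ∀ (xs : List Int), (0 : Int) ∉ xs → pvPref xs = xs := by
  intro xs
  induction xs with
  | nil => intro _; rfl
  | cons a rest ih =>
    intro h
    have ha : a ≠ 0 := by intro e; exact h (by simp [e])
    have hr : (0 : Int) ∉ rest := by intro e; exact h (by simp [e])
    simp [pvPref, ha, ih hr]

theorem pvPref_of_index (xs : List Int) (z : ℕ) (h : PySem.List.index? xs 0 = some z) :
    pvPref xs = xs.take (z + 1) := by
  induction xs generalizing z with
  | nil => simp [PySem.List.index?_eq_idxOf?] at h
  | cons a rest ih =>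
    by_cases ha : a = 0
    · subst ha
      rw [PySem.List.index?_cons_self] at h
      cases h
      simp [pvPref]
    · rw [PySem.List.index?_cons_of_ne rest ha] at h
      simp only [Option.map_eq_some_iff] at h
      obtain ⟨z', hz', rfl⟩ := h
      simp [pvPref, ha, ih z' hz']

theorem lndRun_eq : ∀ (xs : List Int) (r M : Int),
    lndRun M xs r = (match PySem.List.index? xs 0 with
                     | some z => r + (z : Int)
                     | none => M) := by
  intro xs
  induction xs with
  | nil => intro r M; simp [lndRun, PySem.List.index?_eq_idxOf?]
  | cons a rest ih =>
    intro r M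
    by_cases ha : a = 0
    · subst ha
      rw [PySem.List.index?_cons_self]
      simp [lndRun]
    · rw [PySem.List.index?_cons_of_ne rest ha]
      rw [lndRun, if_neg ha, ih]
      cases h : PySem.List.index? rest 0 with
      | none => simp
      | some z => simp; ring

theorem rounds_pairwise (p : Int → Bool) : ∀ (xs : List Int) (r : Int),
    (pvRounds p xs r).Pairwise (· < ·) := by
  intro xs
  induction xs with
  | nil => intro r; simp [pvRounds]
  | cons a rest ih =>
    intro r
    by_cases hp : p a
    · simp only [pvRounds, hp, if_true, List.pairwise_cons]
      refine ⟨fun m hm => ?_, ih (r + 1)⟩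
      have := rounds_lb p rest (r + 1) m hm; omega
    · simp [pvRounds, hp, ih]

-- both ports in closed form
theorem portA_closed (xs : List Int) (n0 M : Int) :
    compute_markers_py xs n0 M =
      (gg (pvRounds (fun a => decide (a < n0)) (pvPref xs) 1) M,
       gg (pvRounds (fun a => decide (2 * a ≤ n0)) (pvPref xs) 1) M,
       lndRun M xs 1) := by
  rw [compute_markers_py, aLoop_eq, fndRun_eq, fndRun_eq]
  simp

theorem portB_closed (xs : List Int) (n0 M : Int) :
    compute_markers_py_alt xs n0 M =
      ((pvRounds (fun a => decide (a < n0)) (pvPref xs) 1).head?.getD M,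
       (pvRounds (fun a => decide (2 * a ≤ n0)) (pvPref xs) 1).head?.getD M,
       lndRun M xs 1) := by
  rw [compute_markers_py_alt, lndRun_eq]
  cases h : PySem.List.index? xs 0 with
  | none =>
    have h0 : (0 : Int) ∉ xs := (PySem.List.index?_eq_none_iff _ _).1 h
    rw [pvPref_of_not_mem xs h0]
    simp [bFind_eq]
  | some z =>
    have hp : pvPref xs = xs.take (z + 1) := pvPref_of_index xs z h
    have hs : PySem.List.slice xs none (some ((z : Int) + 1)) = xs.take (z + 1) := by
      have := PySem.List.slice_to_natCast xs (z + 1)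
      simpa using this
    rw [hp]
    simp [bFind_eq, hs]
    ring

theorem gg_of_not_collide (rs : List Int) (M : Int) (h : ¬ pvCollide rs M) :
    gg rs M = rs.head?.getD M := by
  unfold pvCollide at h
  match rs with
  | [] => rfl
  | [m] =>
    by_cases hm : m = M
    · simp [gg, hm]
    · simp [gg, hm]
  | m :: m2 :: rest =>
    have hm : ¬ (m = M) := by
      intro hm; exact h ⟨by simp [hm], by simp⟩
    simp [gg, hm]

theorem gg_ne_head_of_collide (rs : List Int) (M : Int)
    (hp : rs.Pairwise (· < ·)) (hc : pvCollide rs M) : gg rs M ≠ rs.head?.getD M := by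
  obtain ⟨hh, hl⟩ := hc
  match rs with
  | m :: m2 :: rest =>
    have hm : m = M := by simpa using hh
    have h2 : m < m2 := (List.pairwise_cons.1 hp).1 m2 (by simp)
    simp [gg, hm]
    omega

-- ===== VERDICT (by name: the statement is the Claim_ definition above) =====
theorem compute_markers_py_spec : Claim_unchanged_compute_markers_py := by
  intro xs n0 M _ hND
  rw [D_iff, not_or] at hND
  rw [portA_closed, portB_closed,
    gg_of_not_collide _ _ hND.1, gg_of_not_collide _ _ hND.2]

theorem compute_markers_py_changed : Claim_changed_compute_markers_py := by
  unfold Claim_changed_compute_markers_py; decide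

theorem compute_markers_py_tight : Claim_exact_compute_markers_py := by
  intro xs n0 M _ hD
  rw [portA_closed, portB_closed]
  rw [D_iff] at hD
  rcases hD with hc | hc
  · intro hEq
    exact gg_ne_head_of_collide _ _ (rounds_pairwise _ _ _) hc (congrArg (·.1) hEq)
  · intro hEq
    exact gg_ne_head_of_collide _ _ (rounds_pairwise _ _ _) hc (congrArg (fun t => t.2.1) hEq)
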